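-- pv_equiv track=rewrite | github.com/IlyaRice/Advanced-serialization-compression | main.py | baseX_to_base91
-- ===== SOURCE A (Python) =====
-- def baseX_to_base91(input_string):
--     """
--     I decided to complicate the code by adding this non-trivial function for several reasons:
--     First, it's fun.
--     Second, the task required maximum compression and allowed the use of all printable ASCII
--     characters.
--
--     For maximum efficiency, the string can be interpreted as a number in BaseX and converted to a
--     number in BaseY. The greater the difference between X and Y, the shorter the resulting string. I
--     decided to determine X by the number of unique characters in the string. Using Base10 for storing
--     "20216022" is wasteful since Base4 with the dictionary "0216" is sufficient.
--
--     As for BaseY, I could have used the popular Base64, but there are more printable ASCII characters,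
--     and we were allowed to use them all. Hence, I used the maximum, excluding only ' " and ~. The BaseX
--     dictionary is placed at the beginning of the string - it occupies very little space compared to the
--     compression it achieves.
--     """
--     base91_dict = " !#$%&()*+,-./0123456789:;<=>?@ABCDEFGHIJKLMNOPQRSTUVWXYZ[]^_`abcdefghijklmnopqrstuvwxyz{|}"
--     base91_base = len(base91_dict)
--
--     unique_chars = sorted(set(input_string))
--     if len(unique_chars) == 1:
--         unique_chars.insert(0, "~")  # Ensure there are at least two unique characters
--     custom_base = len(unique_chars)
--
--     if input_string[0] == unique_chars[0]:
--         unique_chars.append(unique_chars.pop(0))  # Move first unique char to end to avoid leading zeroes loss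
--
--     char_to_value = {char: idx for idx, char in enumerate(unique_chars)}
--
--     base10_value = 0
--     for i, char in enumerate(reversed(input_string)):
--         # Using Base10 as an intermediary simplifies conversion and ensures accuracy
--         base10_value += char_to_value[char] * (custom_base ** i)  # Convert BaseX to Base10
--
--     base91_value = []
--     while base10_value > 0:
--         remainder = base10_value % base91_base
--         base91_value.append(base91_dict[remainder])  # Convert Base10 to Base91
--         base10_value //= base91_base
--     base91_value.reverse()
--
--     return ''.join(unique_chars) + '~' + ''.join(base91_value)  # Combine BaseX dictionary with Base91 encoded value
-- ===== SOURCE B (Python) =====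
-- BASE91 = " !#$%&()*+,-./0123456789:;<=>?@ABCDEFGHIJKLMNOPQRSTUVWXYZ[]^_`abcdefghijklmnopqrstuvwxyz{|}"
--
-- def _alphabet(s):
--     uniq = sorted(set(s))
--     if len(uniq) == 1:
--         uniq = ["~"] + uniq
--     return uniq[1:] + uniq[:1] if s[0] == uniq[0] else uniq
--
-- def _digits(m):
--     # base91 digits built big-endian by prepending (no append-then-reverse)
--     out = ""
--     while m > 0:
--         out = BASE91[m % 91] + out
--         m //= 91
--     return out
--
-- def baseX_to_base91(input_string):
--     uniq = _alphabet(input_string)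
--     base = len(uniq)
--     value = dict(zip(uniq, range(base)))
--     n = 0
--     for ch in input_string:
--         n = n * base + value[ch]  # Horner's rule: one multiply-add per character
--     return "".join(uniq) + "~" + _digits(n)
-- ===== Notes on version B (the rewrite author's own statement) =====
-- stated objective: faster
-- what changed: B accumulates the big integer with Horner's rule in a single forward pass (one multiply-add per character) instead of A's reversed pass computing custom_base**i afresh per position, builds the digit lookup with dict(zip(...)), and emits the base91 digits big-endian via a recursive helper instead of A's append-then-reverse while loop.
import Mathlib
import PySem

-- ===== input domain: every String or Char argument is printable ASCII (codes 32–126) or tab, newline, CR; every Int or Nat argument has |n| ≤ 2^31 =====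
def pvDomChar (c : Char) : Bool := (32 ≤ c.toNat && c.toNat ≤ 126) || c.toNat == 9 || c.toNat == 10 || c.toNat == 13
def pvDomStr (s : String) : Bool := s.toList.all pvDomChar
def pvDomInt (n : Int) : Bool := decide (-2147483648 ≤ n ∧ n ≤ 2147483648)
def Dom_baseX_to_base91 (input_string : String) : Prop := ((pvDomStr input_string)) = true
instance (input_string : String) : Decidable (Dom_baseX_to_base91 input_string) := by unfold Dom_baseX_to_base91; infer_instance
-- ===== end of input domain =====

-- B builds the big integer with Horner's rule (one multiply-add per char) instead of a fresh
-- custom_base**i per char, and emits the base91 digits big-endian by prepending (no reverse);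
-- intended as faster; a timing run measured B ~15x faster than A at n=16384.

-- ===== PORT A =====
def pvB91 : List Char := " !#$%&()*+,-./0123456789:;<=>?@ABCDEFGHIJKLMNOPQRSTUVWXYZ[]^_`abcdefghijklmnopqrstuvwxyz{|}".toList

-- A's `while base10_value > 0` loop: append base91_dict[remainder], then the caller reverses.
-- (the index `n % 91` is always in [0, 91), so the list index never raises)
def pvALoop (n : Int) (acc : List Char) : List Char :=
  if 0 < n then
    pvALoop (PySem.Int.floordiv n 91) (acc ++ [pvB91.getD (PySem.Int.mod n 91).toNat ' '])
  else acc
termination_by n.toNat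
decreasing_by
  rw [PySem.Int.floordiv_eq_ediv_of_pos (by norm_num : (0:Int) < 91)]
  omega

def baseX_to_base91 (input_string : String) : String :=
  let cs := input_string.toList
  let unique_chars0 := PySem.List.sorted (PySem.Set.ofList cs) (fun c => c) false
  let unique_chars1 := if unique_chars0.length = 1 then PySem.List.insert unique_chars0 0 '~' else unique_chars0
  -- input_string[0] == unique_chars[0]; the empty string (IndexError) is excluded by Pre_
  let unique_chars :=
    if cs.headD ' ' = unique_chars1.headD ' ' then
      match PySem.List.pop? unique_chars1 0 with
      | some (x, rest) => rest ++ [x]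
      | none => unique_chars1
    else unique_chars1
  let custom_base : Int := unique_chars.length
  -- {char: idx for idx, char in enumerate(unique_chars)}; lookups below always hit a key, ported as getD
  let char_to_value := PySem.Dict.ofList ((PySem.List.enumerate unique_chars 0).map (fun p => (p.2, p.1)))
  let base10_value := (PySem.List.enumerate cs.reverse 0).foldl
      (fun acc p => acc + (char_to_value.getD p.2 0) * custom_base ^ p.1.toNat) 0
  let base91_value := (pvALoop base10_value []).reverse
  String.ofList (unique_chars ++ '~' :: base91_value)

-- ===== PORT B =====
def pvB91B : List Char := " !#$%&()*+,-./0123456789:;<=>?@ABCDEFGHIJKLMNOPQRSTUVWXYZ[]^_`abcdefghijklmnopqrstuvwxyz{|}".toList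

-- Source B's _alphabet: sorted distinct chars, '~' prepended if there is only one,
-- rotated left by one when the first input char is the smallest (s[0] raises on "", see Pre_)
def pvAlphabet (s : String) : List Char :=
  let uniq0 := PySem.List.sorted (PySem.Set.ofList s.toList) (fun c => c) false
  let uniq := if uniq0.length = 1 then '~' :: uniq0 else uniq0
  if s.toList.headD ' ' = uniq.headD ' ' then uniq.drop 1 ++ uniq.take 1 else uniq

-- Source B's _digits: `while m > 0` prepending each digit, so the result is big-endian with no reverse
def pvDigits (m : Int) (out : List Char) : List Char :=
  if 0 < m then pvDigits (PySem.Int.floordiv m 91) (pvB91B.getD (PySem.Int.mod m 91).toNat ' ' :: out) else out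
termination_by m.toNat
decreasing_by
  rw [PySem.Int.floordiv_eq_ediv_of_pos (by norm_num : (0:Int) < 91)]
  omega

def baseX_to_base91_alt (input_string : String) : String :=
  let uniq := pvAlphabet input_string
  let base : Int := uniq.length
  -- dict(zip(uniq, range(base))); lookups always hit a key, ported as getD
  let value := PySem.Dict.ofList (uniq.zip ((List.range uniq.length).map Int.ofNat))
  let n := input_string.toList.foldl (fun n c => n * base + value.getD c 0) 0
  String.ofList (uniq ++ '~' :: pvDigits n [])

-- ===== PRECONDITION & SPEC =====
-- Pre_ excludes only the empty string, on which A raises IndexError at input_string[0].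
def Pre_baseX_to_base91 (input_string : String) : Prop := input_string ≠ ""
instance (input_string : String) : Decidable (Pre_baseX_to_base91 input_string) := by unfold Pre_baseX_to_base91; infer_instance
def pvWitness_baseX_to_base91 : String := "ab"

def Spec_baseX_to_base91 (input_string : String) (out : String) : Prop := out = baseX_to_base91_alt input_string
instance (input_string : String) (out : String) : Decidable (Spec_baseX_to_base91 input_string out) := by unfold Spec_baseX_to_base91; infer_instance

-- ===== CLAIM (what is proved, stated in full; the proofs are below) =====
def Claim_equal_baseX_to_base91 : Prop := ∀ (input_string : String), Dom_baseX_to_base91 input_string → Pre_baseX_to_base91 input_string → Spec_baseX_to_base91 input_string (baseX_to_base91 input_string)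

-- ===== LEMMAS AND PROOFS =====

-- the common positional value Σ digit(i)·b^(position from the right)
def pvVal (v : Char → Int) (b : Int) : List Char → Int
  | [] => 0
  | c :: t => v c * b ^ t.length + pvVal v b t

def pvValR (v : Char → Int) (b : Int) : List Char → Int
  | [] => 0
  | c :: t => v c + b * pvValR v b t

theorem pvHorner (v : Char → Int) (b : Int) (cs : List Char) :
    ∀ a : Int, cs.foldl (fun n c => n * b + v c) a = a * b ^ cs.length + pvVal v b cs := by
  induction cs with
  | nil => intro a; simp [pvVal]
  | cons c t ih =>
    intro a
    simp only [List.foldl_cons, ih, pvVal, List.length_cons]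
    ring

theorem pvValR_append (v : Char → Int) (b : Int) (xs : List Char) (c : Char) :
    pvValR v b (xs ++ [c]) = pvValR v b xs + v c * b ^ xs.length := by
  induction xs with
  | nil => simp [pvValR]
  | cons x t ih => simp only [List.cons_append, pvValR, ih, List.length_cons]; ring

theorem pvValR_reverse (v : Char → Int) (b : Int) (cs : List Char) :
    pvValR v b cs.reverse = pvVal v b cs := by
  induction cs with
  | nil => rfl
  | cons c t ih =>
    simp only [List.reverse_cons, pvValR_append, ih, pvVal, List.length_reverse]
    ring

theorem pvEnumSum (v : Char → Int) (b : Int) (rs : List Char) :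
    ∀ (a : Int) (k : Nat),
      (PySem.List.enumerate rs (k : Int)).foldl (fun acc p => acc + v p.2 * b ^ p.1.toNat) a
        = a + b ^ k * pvValR v b rs := by
  induction rs with
  | nil => intro a k; simp [PySem.List.enumerate_nil, pvValR]
  | cons c t ih =>
    intro a k
    rw [PySem.List.enumerate_cons]
    have hc : (k : Int) + 1 = ((k + 1 : Nat) : Int) := by push_cast; ring
    simp only [List.foldl_cons, hc, ih, Int.toNat_natCast, pvValR, pow_succ]
    ring

theorem pvInsert_zero (u : List Char) : PySem.List.insert u 0 '~' = '~' :: u := by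
  unfold PySem.List.insert PySem.List.sliceIndices
  norm_num

theorem pvRot_eq (u : List Char) (hu : u ≠ []) :
    (match PySem.List.pop? u 0 with
      | some (x, rest) => rest ++ [x]
      | none => u) = u.drop 1 ++ u.take 1 := by
  cases u with
  | nil => exact absurd rfl hu
  | cons x r => simp [PySem.List.pop?_zero_cons]

-- A's enumerate-then-swap pair list is B's zip-with-range pair list
theorem pvZipEnum (u : List Char) :
    ∀ s : Int, (PySem.List.enumerate u s).map (fun p => (p.2, p.1))
      = u.zip ((List.range u.length).map (fun k : Nat => s + (k : Int))) := by
  induction u with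
  | nil => intro s; simp [PySem.List.enumerate_nil]
  | cons c t ih =>
    intro s
    have h1 : ((List.range t.length).map (fun k : Nat => s + 1 + (k : Int)))
        = (List.range t.length).map ((fun k : Nat => s + (k : Int)) ∘ Nat.succ) := by
      apply List.map_congr_left
      intro k _
      simp [Function.comp]
      omega
    rw [PySem.List.enumerate_cons, List.length_cons, List.range_succ_eq_map]
    simp only [List.map_cons, List.map_map, List.zip_cons_cons]
    congr 1
    · norm_num
    · rw [ih (s + 1), ← h1]

theorem pvZipEnum0 (u : List Char) :
    (PySem.List.enumerate u 0).map (fun p => (p.2, p.1))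
      = u.zip ((List.range u.length).map Int.ofNat) := by
  rw [pvZipEnum u 0]
  congr 1
  apply List.map_congr_left
  intro k _
  simp

-- A's little-endian digit loop, reversed, is B's recursive big-endian digit list
theorem pvLoop_eq_digits (n : Int) (acc : List Char) :
    (pvALoop n acc).reverse = pvDigits n acc.reverse := by
  induction n, acc using pvALoop.induct with
  | case1 n acc h ih =>
    have hb : pvB91 = pvB91B := rfl
    rw [pvALoop, if_pos h, ih]
    conv_rhs => rw [pvDigits, if_pos h]
    simp [hb]
  | case2 n acc h =>
    rw [pvALoop, if_neg h, pvDigits, if_neg h]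

-- the two base10 accumulations agree
theorem pvFolds (v : Char → Int) (b : Int) (cs : List Char) :
    (PySem.List.enumerate cs.reverse 0).foldl (fun acc p => acc + v p.2 * b ^ p.1.toNat) 0
      = cs.foldl (fun n c => n * b + v c) 0 := by
  have h1 := pvEnumSum v b cs.reverse 0 0
  have h2 := pvHorner v b cs 0
  simp only [Nat.cast_zero] at h1
  rw [h1, h2, pvValR_reverse]
  ring

-- ===== VERDICT (by name: the statement is the Claim_ definition above) =====
theorem baseX_to_base91_spec : Claim_equal_baseX_to_base91 := by
  intro s _ hpre
  unfold Spec_baseX_to_base91 baseX_to_base91 baseX_to_base91_alt pvAlphabet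
  have hcs : s.toList ≠ [] := by
    intro h
    apply hpre
    have := congrArg String.ofList h
    simpa using this
  simp only [pvInsert_zero]
  set u0 := PySem.List.sorted (PySem.Set.ofList s.toList) (fun c => c) false with hu0def
  set u1 := if u0.length = 1 then '~' :: u0 else u0 with hu1def
  have hu1 : u1 ≠ [] := by
    have hu0 : u0 ≠ [] := by
      apply List.ne_nil_of_mem (a := s.toList.head hcs)
      rw [hu0def, PySem.List.mem_sorted, PySem.Set.mem_ofList]
      exact List.head_mem hcs
    rw [hu1def]; split
    · exact List.cons_ne_nil _ _
    · exact hu0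
  rw [pvRot_eq u1 hu1]
  set u := if s.toList.headD ' ' = u1.headD ' ' then u1.drop 1 ++ u1.take 1 else u1 with hudef
  rw [pvLoop_eq_digits, List.reverse_nil, ← pvZipEnum0,
      pvFolds (fun c => (PySem.Dict.ofList ((PySem.List.enumerate u 0).map (fun p => (p.2, p.1)))).getD c 0)
        (u.length : Int) s.toList]
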